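-- pv_equiv track=rewrite | github.com/inwoo7233/Algorithm_practice | 코드잇/greedy_algorithm/min_fee.py | min_fee
-- ===== SOURCE A (Python) =====
-- def min_fee(pages_to_print):
--     sorted_list = sorted(pages_to_print)
--     pay = 0
--     i = 0
--     while i < len(sorted_list):
--         pay += sorted_list[i] * (len(sorted_list) - i)
--         i += 1
--
--     return pay
-- ===== SOURCE B (Python) =====
-- def min_fee(pages_to_print):
--     pay = 0
--     running = 0
--     for t in sorted(pages_to_print):
--         running += t
--         pay += running
--     return pay
-- ===== Notes on version B (the rewrite author's own statement) =====
-- stated objective: alternative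
-- what changed: Instead of multiplying each sorted element by its remaining count, B keeps a running prefix sum and accumulates it, summing prefix sums in one pass without index arithmetic.
import Mathlib
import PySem

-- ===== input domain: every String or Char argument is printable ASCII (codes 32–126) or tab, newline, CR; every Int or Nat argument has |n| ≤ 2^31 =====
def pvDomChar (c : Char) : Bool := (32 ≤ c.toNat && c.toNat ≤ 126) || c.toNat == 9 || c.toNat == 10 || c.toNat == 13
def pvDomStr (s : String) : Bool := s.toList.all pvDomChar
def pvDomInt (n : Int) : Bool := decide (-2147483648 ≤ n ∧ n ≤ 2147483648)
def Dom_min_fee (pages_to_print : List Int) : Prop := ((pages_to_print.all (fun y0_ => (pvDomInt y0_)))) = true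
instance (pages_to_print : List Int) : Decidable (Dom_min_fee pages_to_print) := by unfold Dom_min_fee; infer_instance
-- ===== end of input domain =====

-- B replaces A's element × remaining-count products by a running prefix sum accumulated in one pass (alternative decomposition, same cost).

-- ===== PORT A =====
-- A's while loop over index i: pay += sorted_list[i] * (len - i)
def min_fee_loop (s : List Int) (pay : Int) (i : Nat) : Int :=
  if h : i < s.length then
    min_fee_loop s (pay + s[i] * ((s.length : Int) - (i : Int))) (i + 1)
  else pay
termination_by s.length - i

def min_fee (pages_to_print : List Int) : Int :=
  min_fee_loop (PySem.List.sorted pages_to_print (fun x => x)) 0 0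

-- ===== PORT B =====
def min_fee_alt (pages_to_print : List Int) : Int :=
  ((PySem.List.sorted pages_to_print (fun x => x)).foldl
    (fun (st : Int × Int) t => (st.1 + t, st.2 + (st.1 + t))) (0, 0)).2

-- ===== PRECONDITION & SPEC =====
def Spec_min_fee (pages_to_print : List Int) (out : Int) : Prop := out = min_fee_alt pages_to_print
instance (pages_to_print : List Int) (out : Int) : Decidable (Spec_min_fee pages_to_print out) := by unfold Spec_min_fee; infer_instance

-- ===== CLAIM (what is proved, stated in full; the proofs are below) =====
def Claim_equal_min_fee : Prop := ∀ (pages_to_print : List Int), Dom_min_fee pages_to_print → Spec_min_fee pages_to_print (min_fee pages_to_print)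

-- ===== LEMMAS AND PROOFS =====

-- weighted suffix sum: Σ t[k] * (|t| - k)
def wsum : List Int → Int
  | [] => 0
  | x :: r => x * ((x :: r).length : Int) + wsum r

theorem min_fee_loop_eq (s : List Int) : ∀ d i pay, s.length - i = d →
    min_fee_loop s pay i = pay + wsum (s.drop i) := by
  intro d
  induction d with
  | zero =>
    intro i pay h
    rw [min_fee_loop]
    have hi : ¬ i < s.length := by omega
    have hd : s.drop i = [] := List.drop_eq_nil_of_le (by omega)
    simp [hi, hd, wsum]
  | succ n ih =>
    intro i pay h
    have hi : i < s.length := by omega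
    rw [min_fee_loop]
    simp only [hi, dif_pos]
    rw [ih (i + 1) _ (by omega)]
    have hdrop : s.drop i = s[i] :: s.drop (i + 1) := List.drop_eq_getElem_cons hi
    rw [hdrop, wsum]
    have hlen : ((s[i] :: s.drop (i + 1)).length : Int) = (s.length : Int) - (i : Int) := by
      simp [List.length_drop]; omega
    rw [hlen]; ring

theorem foldl_eq_wsum (t : List Int) : ∀ r p,
    (t.foldl (fun (st : Int × Int) x => (st.1 + x, st.2 + (st.1 + x))) (r, p)).2
      = p + r * (t.length : Int) + wsum t := by
  induction t with
  | nil => intro r p; simp [wsum]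
  | cons x r ih =>
    intro a p
    simp only [List.foldl_cons, wsum, ih, List.length_cons]
    push_cast
    ring

-- ===== VERDICT (by name: the statement is the Claim_ definition above) =====
theorem min_fee_spec : Claim_equal_min_fee := by
  intro xs _
  unfold Spec_min_fee min_fee min_fee_alt
  rw [min_fee_loop_eq _ _ 0 0 rfl, foldl_eq_wsum]
  simp
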